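-- pv_equiv track=rewrite | github.com/HarshaVippala/ResumeForge | backend/services/resume/enhancers/skills_merger.py | _prioritize_skills
-- ===== SOURCE A (Python) =====
-- from typing import Dict, List, Any, Optional, Set
--
-- def _prioritize_skills(skills: List[str], job_keywords: List[str]) -> List[str]:
--     """Prioritize skills based on job relevance"""
--
--     job_keywords_lower = [k.lower() for k in job_keywords]
--
--     # Separate into job-relevant and other skills
--     job_relevant = []
--     other_skills = []
--
--     for skill in skills:
--         if any(keyword in skill.lower() or skill.lower() in keyword for keyword in job_keywords_lower):
--             job_relevant.append(skill)
--         else: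
--             other_skills.append(skill)
--
--     # Return job-relevant first, then others
--     return job_relevant + other_skills
-- ===== SOURCE B (Python) =====
-- def _prioritize_skills(skills, job_keywords):
--     """Prioritize skills based on job relevance"""
--     job_keywords_lower = [k.lower() for k in job_keywords]
--
--     def relevant(skill):
--         return any(keyword in skill.lower() or skill.lower() in keyword
--                    for keyword in job_keywords_lower)
--
--     # Stable sort by a binary key: relevant skills first, original order kept within each group
--     return sorted(skills, key=lambda s: 0 if relevant(s) else 1)
-- ===== Notes on version B (the rewrite author's own statement) =====
-- stated objective: idiomatic
-- what changed: Replaces the two-accumulator partition loop by a single stable sort on a binary relevance key; Python's stable sort keeps relevant skills first and preserves original order within each group.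
import Mathlib
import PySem

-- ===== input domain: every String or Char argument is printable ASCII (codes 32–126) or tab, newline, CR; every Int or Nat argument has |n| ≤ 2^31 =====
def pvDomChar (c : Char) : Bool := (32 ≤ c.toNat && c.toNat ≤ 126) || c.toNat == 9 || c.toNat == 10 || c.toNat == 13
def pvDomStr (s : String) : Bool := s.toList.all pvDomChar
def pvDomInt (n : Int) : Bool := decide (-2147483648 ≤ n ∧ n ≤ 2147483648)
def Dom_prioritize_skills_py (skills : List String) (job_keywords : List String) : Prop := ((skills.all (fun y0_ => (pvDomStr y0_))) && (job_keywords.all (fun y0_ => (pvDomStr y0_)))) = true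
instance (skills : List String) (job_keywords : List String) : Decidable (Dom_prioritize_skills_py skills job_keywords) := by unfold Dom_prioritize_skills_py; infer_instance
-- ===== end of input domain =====

-- B replaces A's two-accumulator partition loop by one stable sort on a binary relevance key (same cost class, more idiomatic); return value only, no mutation.


-- ===== PORT A =====
-- 'any(keyword in skill.lower() or skill.lower() in keyword for keyword in job_keywords_lower)'
def pvRelevant (job_keywords_lower : List String) (skill : String) : Bool :=
  job_keywords_lower.any (fun keyword =>
    PySem.Str.isIn keyword (PySem.Str.lower skill) || PySem.Str.isIn (PySem.Str.lower skill) keyword)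

def prioritize_skills_py (skills : List String) (job_keywords : List String) : List String :=
  let job_keywords_lower := job_keywords.map PySem.Str.lower
  let st := skills.foldl (fun (acc : List String × List String) skill =>
      if pvRelevant job_keywords_lower skill then (acc.1 ++ [skill], acc.2)
      else (acc.1, acc.2 ++ [skill])) ([], [])
  st.1 ++ st.2

-- ===== PORT B =====
def prioritize_skills_py_alt (skills : List String) (job_keywords : List String) : List String :=
  let job_keywords_lower := job_keywords.map PySem.Str.lower
  PySem.List.sorted skills (fun s => if pvRelevant job_keywords_lower s then (0 : Int) else 1) false

-- ===== PRECONDITION & SPEC =====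
def Spec_prioritize_skills_py (skills : List String) (job_keywords : List String) (out : List String) : Prop := out = prioritize_skills_py_alt skills job_keywords
instance (skills : List String) (job_keywords : List String) (out : List String) : Decidable (Spec_prioritize_skills_py skills job_keywords out) := by unfold Spec_prioritize_skills_py; infer_instance

-- ===== CLAIM (what is proved, stated in full; the proofs are below) =====
def Claim_equal_prioritize_skills_py : Prop := ∀ (skills : List String) (job_keywords : List String), Dom_prioritize_skills_py skills job_keywords → Spec_prioritize_skills_py skills job_keywords (prioritize_skills_py skills job_keywords)

-- ===== LEMMAS AND PROOFS =====

-- Inserting a key-0 element into "zeros ++ ones" lands at the end of the zeros block.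
theorem insertBy_binary_rel (p : String → Bool) (x : String) (A B : List String)
    (hA : ∀ a ∈ A, p a = true) (hB : ∀ b ∈ B, p b = false) (hx : p x = true) :
    PySem.List.insertBy
      (fun a b => decide ((if p a then (0 : Int) else 1) < (if p b then (0 : Int) else 1)))
      x (A ++ B) = (A ++ [x]) ++ B := by
  induction A with
  | nil =>
    cases B with
    | nil => simp [PySem.List.insertBy]
    | cons b B' =>
      have hb := hB b (by simp)
      simp [PySem.List.insertBy, hx, hb]
  | cons a A' ih =>
    have ha := hA a (by simp)
    simp only [List.cons_append, PySem.List.insertBy, ha, hx]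
    rw [if_neg (by simp)]
    have := ih (fun a h => hA a (by simp [h]))
    simp [this]

-- Inserting a key-1 element goes to the very end (its key is never less than any key).
theorem insertBy_binary_irrel (p : String → Bool) (x : String) (ys : List String)
    (hx : p x = false) :
    PySem.List.insertBy
      (fun a b => decide ((if p a then (0 : Int) else 1) < (if p b then (0 : Int) else 1)))
      x ys = ys ++ [x] := by
  apply PySem.List.insertBy_of_forall_not_before
  intro y _
  rw [hx]
  simp only [Bool.false_eq_true, if_false, decide_eq_false_iff_not]
  split <;> omega

-- The insertion-sort fold with a binary key keeps the "zeros ++ ones" shape and appends in order.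
theorem foldl_insertBy_binary (p : String → Bool) :
    ∀ (xs A B : List String), (∀ a ∈ A, p a = true) → (∀ b ∈ B, p b = false) →
    xs.foldl (fun acc x =>
      PySem.List.insertBy
        (fun a b => decide ((if p a then (0 : Int) else 1) < (if p b then (0 : Int) else 1)))
        x acc) (A ++ B)
    = (A ++ xs.filter p) ++ (B ++ xs.filter (fun x => !p x)) := by
  intro xs
  induction xs with
  | nil => intro A B _ _; simp
  | cons x xs ih =>
    intro A B hA hB
    by_cases hx : p x = true
    · rw [List.foldl_cons, insertBy_binary_rel p x A B hA hB hx]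
      rw [ih (A ++ [x]) B (by intro a ha; rcases List.mem_append.1 ha with h | h
                              · exact hA a h
                              · simp at h; simpa [h]) hB]
      simp [hx]
    · have hx' : p x = false := by simpa using hx
      rw [List.foldl_cons, insertBy_binary_irrel p x (A ++ B) hx', List.append_assoc]
      rw [ih A (B ++ [x]) hA (by intro b hb; rcases List.mem_append.1 hb with h | h
                                 · exact hB b h
                                 · simp at h; simpa [h])]
      simp [hx']

-- A's partition loop computes (filter p, filter !p).
theorem foldl_partition (p : String → Bool) :
    ∀ (xs : List String) (jr os : List String),
    xs.foldl (fun (acc : List String × List String) x =>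
      if p x then (acc.1 ++ [x], acc.2) else (acc.1, acc.2 ++ [x])) (jr, os)
    = (jr ++ xs.filter p, os ++ xs.filter (fun x => !p x)) := by
  intro xs
  induction xs with
  | nil => intro jr os; simp
  | cons x xs ih =>
    intro jr os
    by_cases hx : p x = true
    · simp [hx, ih]
    · have hx' : p x = false := by simpa using hx
      simp [hx', ih]

-- ===== VERDICT (by name: the statement is the Claim_ definition above) =====
theorem prioritize_skills_py_spec : Claim_equal_prioritize_skills_py := by
  intro skills job_keywords _
  show prioritize_skills_py skills job_keywords = prioritize_skills_py_alt skills job_keywords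
  have hA : prioritize_skills_py skills job_keywords =
      ((skills.foldl (fun (acc : List String × List String) skill =>
        if pvRelevant (job_keywords.map PySem.Str.lower) skill then (acc.1 ++ [skill], acc.2)
        else (acc.1, acc.2 ++ [skill])) ([], [])).1 ++
       (skills.foldl (fun (acc : List String × List String) skill =>
        if pvRelevant (job_keywords.map PySem.Str.lower) skill then (acc.1 ++ [skill], acc.2)
        else (acc.1, acc.2 ++ [skill])) ([], [])).2) := rfl
  have hB : prioritize_skills_py_alt skills job_keywords =
      PySem.List.sorted skills
        (fun s => if pvRelevant (job_keywords.map PySem.Str.lower) s then (0 : Int) else 1) false := rfl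
  rw [hA, hB, PySem.List.sorted_eq_foldl_insertBy]
  rw [foldl_partition (pvRelevant (job_keywords.map PySem.Str.lower)) skills [] []]
  have h := foldl_insertBy_binary (pvRelevant (job_keywords.map PySem.Str.lower)) skills [] []
       (by intro a h; cases h) (by intro b h; cases h)
  simp only [List.nil_append, List.append_nil] at h
  rw [h]
  simp
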